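-- pv_equiv track=rewrite | github.com/AlexandraLobaeva/2019-2-level-labs | lab_4/main.py | clean_tokenize_corpus
-- ===== SOURCE A (Python) =====
-- def clean_tokenize_corpus(texts_corpus: list) -> list:
--     if not isinstance(texts_corpus, list) or not texts_corpus:
--         return []
--     clean_corpus = []
--     for text in texts_corpus:
--         if isinstance(text, str):
--             text = text.lower()
--             clean_text = []
--             br = '<br />'
--             while br in text:
--                 text = text.replace(br, ' ')
--             one_text = text.split(' ')
--             for word in one_text:
--                 new_word = ''
--                 for i in word:
--                     if i.isalpha():
--                         new_word += i
--                 if new_word != '':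
--                     clean_text.append(new_word)
--             clean_corpus += [clean_text]
--     return clean_corpus
-- ===== SOURCE B (Python) =====
-- def clean_tokenize_corpus(texts_corpus: list) -> list:
--     if not isinstance(texts_corpus, list) or not texts_corpus:
--         return []
--     corpus = []
--     for text in texts_corpus:
--         if not isinstance(text, str):
--             continue
--         text = text.lower()
--         while '<br />' in text:
--             text = text.replace('<br />', ' ')
--         words = []
--         current = ''
--         for ch in text:
--             if ch == ' ':
--                 if current:
--                     words.append(current)
--                 current = ''
--             elif ch.isalpha():
--                 current += ch
--         if current:
--             words.append(current)
--         corpus.append(words)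
--     return corpus
-- ===== Notes on version B (the rewrite author's own statement) =====
-- stated objective: simpler
-- what changed: Replaces split(' ') followed by a nested per-word character-filter loop with a single character scan per text that keeps one buffer, flushing it on each space and appending only alphabetic characters.
import Mathlib
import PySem

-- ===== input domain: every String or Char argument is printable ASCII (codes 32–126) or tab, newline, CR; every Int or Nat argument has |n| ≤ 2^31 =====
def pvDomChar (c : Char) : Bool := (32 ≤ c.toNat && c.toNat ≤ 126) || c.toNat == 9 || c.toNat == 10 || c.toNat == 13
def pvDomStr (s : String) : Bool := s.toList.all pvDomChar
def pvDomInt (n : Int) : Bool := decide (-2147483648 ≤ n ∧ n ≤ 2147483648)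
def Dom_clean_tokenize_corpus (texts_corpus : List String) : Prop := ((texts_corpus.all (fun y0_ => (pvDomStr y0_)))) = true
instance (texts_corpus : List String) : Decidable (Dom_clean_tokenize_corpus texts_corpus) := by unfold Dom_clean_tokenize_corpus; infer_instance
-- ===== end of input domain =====

-- B replaces A's split(' ') + nested per-word filter loop by a single per-text character scan
-- with one buffer (flush on space, keep alphabetic chars); same return value on every input.

-- `while '<br />' in text: text = text.replace('<br />', ' ')` — both Pythons contain this
-- literal loop; fuel (length + 1) only makes the same computation total (each replacing
-- iteration strictly shortens the string).
def pvBrFix : Nat → List Char → List Char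
  | 0, t => t
  | fuel + 1, t =>
    if PySem.Chars.isIn "<br />".toList t then
      pvBrFix fuel (PySem.Chars.replace t "<br />".toList [' '])
    else t

-- ===== PORT A =====
def pvCleanA (text : String) : List String :=
  let t := PySem.Chars.lower text.toList
  let t := pvBrFix (t.length + 1) t
  let one_text := PySem.Chars.splitOn t [' ']
  one_text.foldl
    (fun clean_text word =>
      let new_word := word.foldl (fun nw c => if PySem.Chars.isalpha c then nw ++ [c] else nw) []
      if new_word ≠ [] then clean_text ++ [String.ofList new_word] else clean_text)
    []

def clean_tokenize_corpus (texts_corpus : List String) : List (List String) :=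
  if texts_corpus = [] then []
  else texts_corpus.foldl (fun clean_corpus text => clean_corpus ++ [pvCleanA text]) []

-- ===== PORT B =====
def pvScanStep (st : List String × List Char) (c : Char) : List String × List Char :=
  if c = ' ' then (if st.2 = [] then st.1 else st.1 ++ [String.ofList st.2], [])
  else if PySem.Chars.isalpha c then (st.1, st.2 ++ [c])
  else st

def pvCleanB (text : String) : List String :=
  let t0 := PySem.Chars.lower text.toList
  let t := pvBrFix (t0.length + 1) t0
  let st := t.foldl pvScanStep ([], [])
  if st.2 = [] then st.1 else st.1 ++ [String.ofList st.2]

def clean_tokenize_corpus_alt (texts_corpus : List String) : List (List String) :=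
  if texts_corpus = [] then []
  else texts_corpus.foldl (fun corpus text => corpus ++ [pvCleanB text]) []

-- ===== PRECONDITION & SPEC =====
def Spec_clean_tokenize_corpus (texts_corpus : List String) (out : List (List String)) : Prop := out = clean_tokenize_corpus_alt texts_corpus
instance (texts_corpus : List String) (out : List (List String)) : Decidable (Spec_clean_tokenize_corpus texts_corpus out) := by unfold Spec_clean_tokenize_corpus; infer_instance

-- ===== CLAIM (what is proved, stated in full; the proofs are below) =====
def Claim_equal_clean_tokenize_corpus : Prop := ∀ (texts_corpus : List String), Dom_clean_tokenize_corpus texts_corpus → Spec_clean_tokenize_corpus texts_corpus (clean_tokenize_corpus texts_corpus)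

-- ===== LEMMAS AND PROOFS =====

-- split on a single space, structurally (reference model for Chars.splitOn t [' '])
def pvSplitSp : List Char → List (List Char)
  | [] => [[]]
  | c :: r => if c = ' ' then [] :: pvSplitSp r else (pvSplitSp r).modifyHead (c :: ·)

-- flush a buffer into the word list (skip if empty)
def pvFlushL (ws : List String) (nw : List Char) : List String :=
  if nw = [] then ws else ws ++ [String.ofList nw]

-- A's per-piece processing, with the scan's pending buffer merged into the first piece
def pvCollect (ws : List String) (buf : List Char) : List (List Char) → List String
  | [] => ws
  | w :: rest => pvCollect (pvFlushL ws (buf ++ w.filter PySem.Chars.isalpha)) [] rest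

theorem pvSplitSp_ne_nil (t : List Char) : pvSplitSp t ≠ [] := by
  cases t with
  | nil => simp [pvSplitSp]
  | cons c r =>
    simp only [pvSplitSp]
    split
    · simp
    · cases h : pvSplitSp r with
      | nil => exact absurd h (pvSplitSp_ne_nil r)
      | cons w ps => simp [List.modifyHead]

theorem pvGo_eq (l : List Char) : ∀ (fuel : Nat) (cur : List Char) (acc : List (List Char)),
    l.length < fuel →
    PySem.Chars.splitOn.go [' '] fuel l cur acc = acc.reverse ++ (pvSplitSp l).modifyHead (cur.reverse ++ ·) := by
  induction l with
  | nil =>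
    intro fuel cur acc h
    match fuel, h with
    | fuel + 1, _ => simp [PySem.Chars.splitOn.go, pvSplitSp]
  | cons c rest ih =>
    intro fuel cur acc h
    match fuel, h with
    | fuel + 1, h =>
      by_cases hc : c = ' '
      · subst hc
        have hp : [' '].isPrefixOf (' ' :: rest) = true := by simp [List.isPrefixOf]
        rw [PySem.Chars.splitOn.go, if_pos hp]
        have hd : List.drop [' '].length (' ' :: rest) = rest := rfl
        rw [hd]
        have := ih fuel [] (List.reverse cur :: acc) (by simpa using h)
        rw [this]
        have hid : (pvSplitSp rest).modifyHead (fun x => List.reverse [] ++ x) = pvSplitSp rest := by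
          cases hps : pvSplitSp rest with
          | nil => rfl
          | cons w ps => simp [List.modifyHead]
        rw [hid]
        simp [pvSplitSp]
      · have hp : [' '].isPrefixOf (c :: rest) = false := by
          simp [List.isPrefixOf]
          intro h'; exact absurd h'.symm hc
        rw [PySem.Chars.splitOn.go, if_neg (by simp [hp])]
        have := ih fuel (c :: cur) acc (by simpa using h)
        rw [this]
        simp only [pvSplitSp, if_neg hc, List.modifyHead_modifyHead]
        cases hps : pvSplitSp rest with
        | nil => exact absurd hps (pvSplitSp_ne_nil rest)
        | cons w ps => simp [List.modifyHead]

theorem pvSplitOn_eq (t : List Char) : PySem.Chars.splitOn t [' '] = pvSplitSp t := by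
  unfold PySem.Chars.splitOn
  rw [pvGo_eq t (t.length + 1) [] [] (by omega)]
  cases h : pvSplitSp t with
  | nil => exact absurd h (pvSplitSp_ne_nil t)
  | cons w ps => simp [List.modifyHead]

theorem pvScan_eq_collect (t : List Char) : ∀ (ws : List String) (buf : List Char),
    (let st := t.foldl pvScanStep (ws, buf)
     if st.2 = [] then st.1 else st.1 ++ [String.ofList st.2]) = pvCollect ws buf (pvSplitSp t) := by
  induction t with
  | nil => intro ws buf; simp [pvSplitSp, pvCollect, pvFlushL]
  | cons c rest ih =>
    intro ws buf
    by_cases hc : c = ' '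
    · subst hc
      simp only [List.foldl_cons, pvScanStep, pvSplitSp]
      rw [ih]
      simp [pvCollect, pvFlushL]
    · by_cases ha : PySem.Chars.isalpha c = true
      · simp only [List.foldl_cons, pvScanStep, if_neg hc, if_pos ha]
        rw [ih]
        simp only [pvSplitSp, if_neg hc]
        cases hps : pvSplitSp rest with
        | nil => exact absurd hps (pvSplitSp_ne_nil rest)
        | cons w ps => simp [List.modifyHead, pvCollect, ha, pvFlushL]
      · simp only [List.foldl_cons, pvScanStep, if_neg hc, if_neg ha]
        rw [ih]
        simp only [pvSplitSp, if_neg hc]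
        cases hps : pvSplitSp rest with
        | nil => exact absurd hps (pvSplitSp_ne_nil rest)
        | cons w ps =>
          simp [List.modifyHead, pvCollect, ha]

theorem pvCollect_nil_buf (ps : List (List Char)) : ∀ (ws : List String),
    pvCollect ws [] ps = ps.foldl (fun acc w => pvFlushL acc (w.filter PySem.Chars.isalpha)) ws := by
  induction ps with
  | nil => intro ws; simp [pvCollect]
  | cons w rest ih => intro ws; simp only [pvCollect, List.foldl_cons, List.nil_append]; exact ih _

theorem pvCleanA_eq (text : String) : pvCleanA text = pvCleanB text := by
  unfold pvCleanA pvCleanB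
  simp only [pvSplitOn_eq]
  rw [pvScan_eq_collect, pvCollect_nil_buf]
  apply PySem.List.foldl_congr_mem
  intro acc w _
  rw [PySem.List.foldl_append_if_eq_filter]
  by_cases h : w.filter PySem.Chars.isalpha = [] <;> simp [pvFlushL, h]

-- ===== VERDICT (by name: the statement is the Claim_ definition above) =====
theorem clean_tokenize_corpus_spec : Claim_equal_clean_tokenize_corpus := by
  intro tc _
  unfold Spec_clean_tokenize_corpus clean_tokenize_corpus clean_tokenize_corpus_alt
  simp only [pvCleanA_eq]
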